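-- pv_equiv track=rewrite | github.com/chaosWsF/Python-Practice | leetcode/0029_divide_two_integers.py | _bit_size
-- ===== SOURCE A (Python) =====
-- def _bit_size(dividend: int, divisor: int):
--     """
--     To find max bit size
--     """
--     q = 1
--     while divisor < dividend:
--         divisor <<= 1
--         q <<= 1
--
--     if divisor == dividend:
--         return q, divisor
--     else:
--         return q >> 1, divisor >> 1
-- ===== SOURCE B (Python) =====
-- def _bit_size(dividend: int, divisor: int):
--     """Closed form: find the doubling count via bit_length instead of a loop."""
--     if not (divisor < dividend):
--         if divisor == dividend:
--             return 1, divisor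
--         return 0, divisor >> 1
--     ratio = -(-dividend // divisor)          # ceil(dividend / divisor); needs divisor > 0
--     k = (ratio - 1).bit_length()
--     d = divisor << k
--     if d == dividend:
--         return 1 << k, d
--     return 1 << (k - 1), d >> 1
-- ===== Notes on version B (the rewrite author's own statement) =====
-- stated objective: faster
-- what changed: Replaces A's doubling while-loop by a closed-form computation: the number of doublings is obtained in one step as the bit length of ceil(dividend/divisor)-1, and the result is assembled with shifts.
import Mathlib
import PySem

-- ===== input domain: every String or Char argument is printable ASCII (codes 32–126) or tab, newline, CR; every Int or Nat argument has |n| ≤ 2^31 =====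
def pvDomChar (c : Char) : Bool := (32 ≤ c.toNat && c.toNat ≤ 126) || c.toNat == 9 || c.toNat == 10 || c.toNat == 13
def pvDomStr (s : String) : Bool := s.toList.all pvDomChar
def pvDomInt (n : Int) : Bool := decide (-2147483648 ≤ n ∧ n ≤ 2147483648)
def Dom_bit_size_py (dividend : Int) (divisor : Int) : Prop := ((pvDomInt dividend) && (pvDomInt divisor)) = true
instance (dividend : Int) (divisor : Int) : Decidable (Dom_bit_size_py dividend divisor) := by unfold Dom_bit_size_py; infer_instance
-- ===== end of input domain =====

-- B replaces A's doubling loop by a closed-form bit-length computation (objective: faster, constant-factor).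

-- ===== PORT A =====
-- the while-loop of A; the 'else (0, 0)' branch is a totality guard only: Python
-- diverges there (divisor ≤ 0 < dividend - it can never reach dividend by doubling),
-- and Pre_ excludes those inputs.
def bitLoopA (dividend divisor q : Int) : Int × Int :=
  if divisor < dividend then
    if 0 < divisor then bitLoopA dividend (divisor * 2) (q * 2)
    else (0, 0)
  else if divisor = dividend then (q, divisor)
  else (q >>> (1 : Nat), divisor >>> (1 : Nat))
termination_by (dividend - divisor).toNat
decreasing_by omega

def bit_size_py (dividend : Int) (divisor : Int) : Int × Int :=
  bitLoopA dividend divisor 1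

-- ===== PORT B =====
def bit_size_py_alt (dividend : Int) (divisor : Int) : Int × Int :=
  if ¬ divisor < dividend then
    if divisor = dividend then (1, divisor) else (0, divisor >>> (1 : Nat))
  else
    let ratio : Int := -(PySem.Int.floordiv (-dividend) divisor)
    let k : Nat := PySem.Int.bitLength (ratio - 1)
    let d : Int := divisor <<< k
    if d = dividend then ((1 : Int) <<< k, d) else ((1 : Int) <<< (k - 1), d >>> (1 : Nat))

-- ===== PRECONDITION & SPEC =====
-- Pre_ excludes exactly the inputs where A's while-loop never returns:
-- divisor ≤ 0 together with divisor < dividend (doubling a non-positive divisor never reaches dividend).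
def Pre_bit_size_py (dividend : Int) (divisor : Int) : Prop := 0 < divisor ∨ dividend ≤ divisor
instance (dividend : Int) (divisor : Int) : Decidable (Pre_bit_size_py dividend divisor) := by unfold Pre_bit_size_py; infer_instance
def pvWitness_bit_size_py : Int × Int := (20, 3)

def Spec_bit_size_py (dividend : Int) (divisor : Int) (out : Int × Int) : Prop := out = bit_size_py_alt dividend divisor
instance (dividend : Int) (divisor : Int) (out : Int × Int) : Decidable (Spec_bit_size_py dividend divisor out) := by unfold Spec_bit_size_py; infer_instance

-- ===== CLAIM (what is proved, stated in full; the proofs are below) =====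
def Claim_equal_bit_size_py : Prop := ∀ (dividend : Int) (divisor : Int), Dom_bit_size_py dividend divisor → Pre_bit_size_py dividend divisor → Spec_bit_size_py dividend divisor (bit_size_py dividend divisor)

-- ===== LEMMAS AND PROOFS =====

-- Int shifts as multiplication/floor-division by powers of two
theorem int_shiftLeft_eq (a : Int) (n : Nat) : a <<< n = a * 2 ^ n :=
  Int.shiftLeft_eq a n

theorem int_shiftRight_one_double (m : Int) : (m * 2) >>> (1 : Nat) = m := by
  rw [Int.shiftRight_eq_div_pow]; omega

-- the loop, characterised by the bracket 2^(k-1)*d < N ≤ 2^k*d (k ≥ 1)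
theorem bitLoopA_eq (k : Nat) :
    ∀ (N d q : Int), 0 < d → d < N → N ≤ d * 2 ^ k → d * 2 ^ (k - 1) < N →
    bitLoopA N d q =
      if d * 2 ^ k = N then (q * 2 ^ k, N) else (q * 2 ^ (k - 1), d * 2 ^ (k - 1)) := by
  induction k with
  | zero =>
    intro N d q hd h1 h2 h3
    simp only [pow_zero, mul_one] at h2
    omega
  | succ k' ih =>
    intro N d q hd h1 h2 h3
    rw [bitLoopA, if_pos h1, if_pos hd]
    by_cases c : d * 2 < N
    · have hk' : 1 ≤ k' := by
        rcases Nat.eq_zero_or_pos k' with h | h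
        · subst h; simp only [zero_add, pow_one] at h2; omega
        · exact h
      have e2 : (2 : Int) ^ k' = 2 ^ (k' - 1) * 2 := by
        rw [← pow_succ, Nat.sub_add_cancel hk']
      have hrec := ih N (d * 2) (q * 2) (by omega) c
        (by rw [show d * 2 * 2 ^ k' = d * 2 ^ (k' + 1) by ring]; exact h2)
        (by rw [show d * 2 * 2 ^ (k' - 1) = d * (2 ^ (k' - 1) * 2) by ring, ← e2]
            exact h3)
      rw [hrec, show d * 2 * 2 ^ k' = d * 2 ^ (k' + 1) by ring]
      simp only [Nat.add_sub_cancel]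
      by_cases he : d * 2 ^ (k' + 1) = N
      · rw [if_pos he, if_pos he, show q * 2 * 2 ^ k' = q * 2 ^ (k' + 1) by ring]
      · rw [if_neg he, if_neg he,
            show q * 2 * 2 ^ (k' - 1) = q * 2 ^ k' by rw [e2]; ring,
            show d * 2 * 2 ^ (k' - 1) = d * 2 ^ k' by rw [e2]; ring]
    · -- the next test fails: loop exits with (d*2, q*2); here k' must be 0
      have hk0 : k' = 0 := by
        by_contra hne
        have h1k : 1 ≤ k' := Nat.one_le_iff_ne_zero.mpr hne
        have : (2 : Int) ^ 1 ≤ 2 ^ k' := pow_le_pow_right₀ (by norm_num) h1k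
        have : d * 2 ^ 1 ≤ d * 2 ^ k' := by
          exact mul_le_mul_of_nonneg_left this (le_of_lt hd)
        simp only [pow_one] at this
        simp only [Nat.add_sub_cancel] at h3
        omega
      subst hk0
      rw [bitLoopA, if_neg c]
      simp only [zero_add, pow_one, pow_zero, mul_one, Nat.sub_self]
      by_cases he : d * 2 = N
      · rw [if_pos he, if_pos he, he]
      · rw [if_neg he, if_neg he, int_shiftRight_one_double, int_shiftRight_one_double]

-- ===== VERDICT (by name: the statement is the Claim_ definition above) =====
theorem bit_size_py_spec : Claim_equal_bit_size_py := by
  intro dividend divisor _ hPre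
  unfold Spec_bit_size_py bit_size_py bit_size_py_alt
  by_cases h : divisor < dividend
  · have hd : 0 < divisor := by
      rcases hPre with h' | h'
      · exact h'
      · omega
    simp only [h, not_true, if_neg, not_false_eq_true]
    set ratio : Int := -(PySem.Int.floordiv (-dividend) divisor) with hratio
    have hbr : (ratio - 1) * divisor < dividend ∧ dividend ≤ ratio * divisor :=
      (PySem.Int.neg_floordiv_neg_eq_iff_of_pos hd).mp hratio.symm
    have hratio2 : 2 ≤ ratio := by nlinarith [hbr.1, hbr.2]
    set k : Nat := PySem.Int.bitLength (ratio - 1) with hk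
    have hne : ratio - 1 ≠ 0 := by omega
    have hnabs : ((ratio - 1).natAbs : Int) = ratio - 1 := Int.natAbs_of_nonneg (by omega)
    have hub : ratio - 1 < (2 : Int) ^ k := by
      have := PySem.Int.lt_two_pow_bitLength (ratio - 1)
      calc ratio - 1 = ((ratio - 1).natAbs : Int) := hnabs.symm
        _ < ((2 ^ k : Nat) : Int) := by exact_mod_cast this
        _ = (2 : Int) ^ k := by push_cast; ring
    have hlb : (2 : Int) ^ (k - 1) ≤ ratio - 1 := by
      have := PySem.Int.two_pow_bitLength_le (ratio - 1) hne
      calc (2 : Int) ^ (k - 1) = ((2 ^ (k - 1) : Nat) : Int) := by push_cast; ring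
        _ ≤ ((ratio - 1).natAbs : Int) := by exact_mod_cast this
        _ = ratio - 1 := hnabs
    have hk1 : 1 ≤ k := by
      by_contra hc
      have : k = 0 := by omega
      rw [this] at hub
      simp at hub
      omega
    have hupper : dividend ≤ divisor * 2 ^ k := by nlinarith [hbr.2]
    have hlower : divisor * 2 ^ (k - 1) < dividend := by nlinarith [hbr.1]
    rw [bitLoopA_eq k dividend divisor 1 hd h hupper hlower]
    rw [int_shiftLeft_eq divisor k, int_shiftLeft_eq 1 k, int_shiftLeft_eq 1 (k - 1)]
    have hsr : (divisor * 2 ^ k) >>> (1 : Nat) = divisor * 2 ^ (k - 1) := by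
      rw [show divisor * 2 ^ k = divisor * 2 ^ (k - 1) * 2 by
            rw [mul_assoc, ← pow_succ, Nat.sub_add_cancel hk1]]
      exact int_shiftRight_one_double _
    rw [hsr]
    by_cases he : divisor * 2 ^ k = dividend
    · rw [if_pos he, if_pos he, he, one_mul]
    · rw [if_neg he, if_neg he, one_mul]
  · rw [bitLoopA]
    by_cases he : divisor = dividend
    · simp [he]
    · simp only [if_neg h, if_neg he, if_pos h]
      norm_num
      decide
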